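-- pv_equiv track=rewrite | github.com/spencerkent/vision-transform-codes | vision_transform_codes/utils/jpeg.py | jpg_coeff_to_binstr
-- ===== SOURCE A (Python) =====
-- def jpg_coeff_to_binstr(decimal_number):
--   """
--   Assigns jpeg coefficients a binary str using a 1's-complement-like encoding
--   """
--   if decimal_number == 0:
--     return ''  # the only place this will come up is if the DC coeff is
--                # exactly zero. The decoder will catch this and insert a 0
--
--   elif decimal_number > 0:
--     return "{0:b}".format(decimal_number)
--
--   else:
--     # negative numbers require a little more love
--     temp_string = "{0:b}".format(-decimal_number)
--     str2 = str("")
--     for i in range(len(temp_string)):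
--       if temp_string[i] == '0':
--         str2 += '1'
--       if temp_string[i] == '1':
--         str2 += '0'
--     assert len(str2) == len(temp_string)
--     return str2
-- ===== SOURCE B (Python) =====
-- def jpg_coeff_to_binstr(decimal_number):
--   """
--   Assigns jpeg coefficients a binary str using a 1's-complement-like encoding
--   """
--   if decimal_number == 0:
--     return ''
--   if decimal_number > 0:
--     return format(decimal_number, 'b')
--   m = -decimal_number
--   L = m.bit_length()
--   return format((1 << L) - 1 - m, 'b').zfill(L)
-- ===== Notes on version B (the rewrite author's own statement) =====
-- stated objective: simpler
-- what changed: Negative case computes the one's-complement value by a single integer subtraction from an all-ones mask of the bit length and formats it once with zfill, replacing A's character-by-character bit-flipping loop.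
import Mathlib
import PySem

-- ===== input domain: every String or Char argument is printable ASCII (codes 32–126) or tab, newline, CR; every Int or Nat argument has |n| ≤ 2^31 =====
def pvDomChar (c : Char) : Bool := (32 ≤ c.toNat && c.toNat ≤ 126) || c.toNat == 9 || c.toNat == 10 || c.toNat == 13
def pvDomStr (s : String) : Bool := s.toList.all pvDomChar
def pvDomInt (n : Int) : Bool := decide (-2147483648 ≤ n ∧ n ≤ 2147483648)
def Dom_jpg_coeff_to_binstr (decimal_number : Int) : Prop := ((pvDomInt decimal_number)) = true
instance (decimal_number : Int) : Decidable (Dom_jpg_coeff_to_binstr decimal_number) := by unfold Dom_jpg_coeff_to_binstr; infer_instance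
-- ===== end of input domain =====

-- B replaces A's character-by-character bit-flipping loop on negatives by one arithmetic
-- one's-complement subtraction, formatted once and zero-filled to the bit length (simpler).

-- ===== PORT A =====
-- "{0:b}".format(n) for n ≥ 1 (msb first); exact on positive ints
def pvFmtBin (n : Nat) : List Char :=
  if h : n = 0 then []
  else pvFmtBin (n / 2) ++ [if n % 2 = 1 then '1' else '0']
decreasing_by exact Nat.div_lt_self (Nat.pos_of_ne_zero h) (by norm_num)

def jpg_coeff_to_binstr (decimal_number : Int) : String :=
  if decimal_number = 0 then ""
  else if decimal_number > 0 then String.mk (pvFmtBin decimal_number.toNat)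
  else
    -- temp_string = binary of -decimal_number; loop i over its chars, two ifs in order
    let temp_string := pvFmtBin (-decimal_number).toNat
    let str2 := temp_string.foldl (fun acc c =>
      (acc ++ (if c = '0' then ['1'] else []) ++ (if c = '1' then ['0'] else []))) []
    String.mk str2

-- ===== PORT B =====
-- format(n, 'b') : gives "0" for n = 0 (reached when m = 2^L - 1)
def pvFmtBinB (n : Nat) : List Char :=
  if h : n = 0 then []
  else pvFmtBinB (n / 2) ++ [if n % 2 = 1 then '1' else '0']
decreasing_by exact Nat.div_lt_self (Nat.pos_of_ne_zero h) (by norm_num)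

def pvFormatB (n : Nat) : List Char := if n = 0 then ['0'] else pvFmtBinB n

def jpg_coeff_to_binstr_alt (decimal_number : Int) : String :=
  if decimal_number = 0 then ""
  else if decimal_number > 0 then String.mk (pvFormatB decimal_number.toNat)
  else
    let m := (-decimal_number).toNat
    let L := Nat.size m        -- m.bit_length()
    let s := pvFormatB (2 ^ L - 1 - m)
    String.mk (List.replicate (L - s.length) '0' ++ s)   -- .zfill(L)

-- ===== PRECONDITION & SPEC =====
def Spec_jpg_coeff_to_binstr (decimal_number : Int) (out : String) : Prop := out = jpg_coeff_to_binstr_alt decimal_number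
instance (decimal_number : Int) (out : String) : Decidable (Spec_jpg_coeff_to_binstr decimal_number out) := by unfold Spec_jpg_coeff_to_binstr; infer_instance

-- ===== CLAIM (what is proved, stated in full; the proofs are below) =====
def Claim_equal_jpg_coeff_to_binstr : Prop := ∀ (decimal_number : Int), Dom_jpg_coeff_to_binstr decimal_number → Spec_jpg_coeff_to_binstr decimal_number (jpg_coeff_to_binstr decimal_number)

-- ===== LEMMAS AND PROOFS =====

theorem pvFmtBinB_eq (n : Nat) : pvFmtBinB n = pvFmtBin n := by
  induction n using Nat.strong_induction_on with
  | _ n ih =>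
    rw [pvFmtBinB, pvFmtBin]
    by_cases h : n = 0
    · simp [h]
    · simp only [h, dite_false]
      rw [ih (n / 2) (Nat.div_lt_self (Nat.pos_of_ne_zero h) (by norm_num))]

-- L-digit binary of j (j < 2^L), msb first
def pvBinPad : Nat → Nat → List Char
  | 0, _ => []
  | L + 1, j => pvBinPad L (j / 2) ++ [if j % 2 = 1 then '1' else '0']

theorem size_rec (n : Nat) (h : 1 ≤ n) : Nat.size n = Nat.size (n / 2) + 1 := by
  apply Nat.le_antisymm
  · rw [Nat.size_le, pow_succ]
    have := Nat.lt_size_self (n / 2)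
    omega
  · rcases Nat.eq_zero_or_pos (n / 2) with h2 | h2
    · simp only [h2, Nat.size_zero, Nat.zero_add]
      exact Nat.size_pos.mpr h
    · have hs : 1 ≤ Nat.size (n / 2) := Nat.size_pos.mpr h2
      have h3 : Nat.size (n / 2) - 1 < Nat.size (n / 2) := by omega
      rw [Nat.lt_size] at h3
      have : 2 ^ Nat.size (n / 2) ≤ n := by
        calc 2 ^ Nat.size (n / 2) = 2 * 2 ^ (Nat.size (n / 2) - 1) := by
              rw [← pow_succ']; congr 1; omega
          _ ≤ 2 * (n / 2) := by omega
          _ ≤ n := by omega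
      have := (Nat.lt_size (m := Nat.size (n / 2)) (n := n)).mpr this
      omega

-- flip of pvFmtBin m is the padded binary of the one's complement
theorem flip_fmt (m : Nat) (h : 1 ≤ m) :
    (pvFmtBin m).map (fun c => if c = '0' then '1' else '0')
      = pvBinPad (Nat.size m) (2 ^ Nat.size m - 1 - m) := by
  induction m using Nat.strong_induction_on with
  | _ m ih =>
    rw [pvFmtBin]
    have hm : m ≠ 0 := by omega
    simp only [hm, dite_false, List.map_append, List.map_cons, List.map_nil]
    rw [size_rec m h]
    by_cases h2 : m / 2 = 0
    · have hm1 : m = 1 := by omega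
      subst hm1
      simp [pvFmtBin, pvBinPad]
    · rw [ih (m / 2) (Nat.div_lt_self (by omega) (by norm_num)) (by omega)]
      have hlt : m / 2 < 2 ^ Nat.size (m / 2) := Nat.lt_size_self _
      have hkey : (2 ^ (Nat.size (m / 2) + 1) - 1 - m) / 2
            = 2 ^ Nat.size (m / 2) - 1 - m / 2 ∧
          (2 ^ (Nat.size (m / 2) + 1) - 1 - m) % 2 = 1 - m % 2 := by
        have hd : m = 2 * (m / 2) + m % 2 := (Nat.div_add_mod m 2).symm ▸ by omega
        have hp : 2 ^ (Nat.size (m / 2) + 1) = 2 * 2 ^ Nat.size (m / 2) := by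
          rw [pow_succ]; ring
        constructor <;> omega
      rw [pvBinPad, hkey.1]
      congr 1
      have h01 : m % 2 = 0 ∨ m % 2 = 1 := by omega
      rcases h01 with h01 | h01 <;> simp [hkey.2, h01]

-- zfill L (format j) = pvBinPad L j, for j < 2^L, L ≥ 1
theorem zfill_eq_binPad (L j : Nat) (hL : 1 ≤ L) (hj : j < 2 ^ L) :
    List.replicate (L - (pvFormatB j).length) '0' ++ pvFormatB j = pvBinPad L j := by
  induction L generalizing j with
  | zero => omega
  | succ L ih =>
    by_cases h0 : j = 0
    · subst h0
      clear ih hj hL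
      induction L with
      | zero => simp [pvFormatB, pvBinPad]
      | succ L ih =>
        show List.replicate (L + 1) '0' ++ ['0'] = pvBinPad (L + 1) 0 ++ ['0']
        rw [← ih]
        simp [pvFormatB, List.replicate_succ' (n := L)]
    · have hhalf : j / 2 < 2 ^ L := by
        have hp : (2:Nat) ^ (L + 1) = 2 * 2 ^ L := by rw [pow_succ]; ring
        omega
      rw [pvBinPad]
      by_cases hL0 : L = 0
      · subst hL0
        have hj1 : j = 1 := by omega
        subst hj1
        simp [pvFormatB, pvFmtBinB, pvBinPad]
      · rw [← ih (j / 2) (by omega) hhalf]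
        by_cases h2 : j / 2 = 0
        · have hj1 : j = 1 := by omega
          subst hj1
          have hF0 : pvFormatB 0 = ['0'] := by rw [pvFormatB]; norm_num
          have hF1 : pvFormatB 1 = ['1'] := by
            rw [pvFormatB]
            norm_num
            rw [pvFmtBinB]
            norm_num
            rw [pvFmtBinB]
            norm_num
          have hL1 : L + 1 - 1 = (L - 1) + 1 := by omega
          rw [hF1, hF0]
          simp only [List.length_cons, List.length_nil]
          rw [hL1, List.replicate_succ']
          simp
        · have hrec : pvFormatB j = pvFormatB (j / 2) ++ [if j % 2 = 1 then '1' else '0'] := by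
            simp only [pvFormatB, h0, h2, if_false]
            rw [pvFmtBinB]
            simp [h0]
          rw [hrec]
          simp only [List.length_append, List.length_cons, List.length_nil]
          have hlen : L + 1 - ((pvFormatB (j / 2)).length + 1)
              = L - (pvFormatB (j / 2)).length := by omega
          rw [hlen, ← List.append_assoc]

theorem fmt_chars (m : Nat) : ∀ c ∈ pvFmtBin m, c = '0' ∨ c = '1' := by
  induction m using Nat.strong_induction_on with
  | _ m ih =>
    rw [pvFmtBin]
    by_cases h : m = 0
    · simp [h]
    · simp only [h, dite_false]
      intro c hc
      rcases List.mem_append.mp hc with hc | hc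
      · exact ih (m / 2) (Nat.div_lt_self (Nat.pos_of_ne_zero h) (by norm_num)) c hc
      · simp at hc
        split at hc <;> simp [hc]

-- A's flipping loop computes the map of the flip over '0'/'1' strings
theorem foldl_flip (l : List Char) (acc : List Char)
    (hl : ∀ c ∈ l, c = '0' ∨ c = '1') :
    l.foldl (fun acc c =>
        (acc ++ (if c = '0' then ['1'] else []) ++ (if c = '1' then ['0'] else []))) acc
      = acc ++ l.map (fun c => if c = '0' then '1' else '0') := by
  induction l generalizing acc with
  | nil => simp
  | cons c l ih =>
    have hc := hl c (List.mem_cons_self ..)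
    rw [List.foldl_cons, List.map_cons,
      ih _ (fun c hc => hl c (List.mem_cons_of_mem _ hc))]
    rcases hc with hc | hc <;> subst hc <;> simp

-- ===== VERDICT (by name: the statement is the Claim_ definition above) =====
theorem jpg_coeff_to_binstr_spec : Claim_equal_jpg_coeff_to_binstr := by
  intro d _
  unfold Spec_jpg_coeff_to_binstr jpg_coeff_to_binstr jpg_coeff_to_binstr_alt
  by_cases h0 : d = 0
  · simp [h0]
  · simp only [h0, if_false]
    by_cases hp : d > 0
    · simp only [hp, if_true]
      have : d.toNat ≠ 0 := by omega
      simp only [pvFormatB, this, if_false]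
      rw [pvFmtBinB_eq]
    · simp only [hp, if_false]
      have hm : 1 ≤ (-d).toNat := by omega
      rw [foldl_flip _ _ (fmt_chars _), List.nil_append,
        flip_fmt _ hm,
        ← zfill_eq_binPad _ _ (Nat.size_pos.mpr hm) (by
          have := Nat.lt_size_self (-d).toNat; omega)]
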